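-- pv_equiv track=rewrite | github.com/mondiar01/projet_Graphes | projet.py | Apminimum
-- ===== SOURCE A (Python) =====
-- def g_to_triple (G):
--     L = []
--     for i in range (0, len(G)):
--         for j in range (i, len(G)):
--             if (i != j):
--                 L.append([i+1, j+1, G[i][j]])
--     return L
--
-- def takeValue(elem):
--     return elem[2]
--
-- def list_that_contains (s, L):
--     for i in L:
--         if s in i:
--             return i
--     return None
--
-- def list_count (s,L):
--     deg = 0
--     for a in L:
--         if s == a[0] or s == a[1]:
--             deg += 1
--     return deg
--
-- def Apminimum(G):
--     # trier les arètes par poids croissants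
--     aretes = g_to_triple(G)
--     aretes.sort(key = takeValue)
--
--     L_s = [] # Liste des sommets
--     L_a = [] # Liste des arêtes
--
--     # Initialisation
--     for i in range (0, len(G)):
--         L_s.append([i+1])
--
--     Lss = []
--     # Pour chaque arêtes de la forme (s1,s2,p)
--     for w in aretes:
--         # On récupère les listes contenant s1 et s2
--         l1 = list_that_contains(w[0], L_s)
--         l2 = list_that_contains(w[1], L_s)
--
--         # Si s1 et s2 dans liste différente -> union
--         if (list_count (w[0],L_a) < 2) and (list_count (w[1], L_a) < 2):
--             if l1 != l2:
--                 L_a.append(w)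
--                 if not(w[0] in Lss):
--                     Lss.append(w[0])
--                 if not(w[1] in Lss):
--                     Lss.append(w[1])
--                 l1.extend(l2)
--                 L_s.remove(l2)
--
--         # Si on est passés par tous les sommets
--         if (len(L_a) == len(G) -1 ):
--             ls = []
--             for s in L_s[0]:
--                 if list_count(s,L_a) < 2:
--                     ls.append(s)
--             for ar in aretes:
--                 if ls[0] == ar[0] and ls[1] == ar[1] or ls[1] == ar[0] and ls[0] == ar[1]:
--                     L_a.append(ar)
--             break
--     return Lss
-- ===== SOURCE B (Python) =====
-- def Apminimum(G):
--     # Stage 1: Kruskal with degree<=2 on a union-find forest (union by size),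
--     # collecting accepted edges; Stage 2: derive the vertex order by a
--     # first-occurrence pass over the accepted edges' endpoints.
--     n = len(G)
--     edges = sorted(((G[i][j], i + 1, j + 1) for i in range(n) for j in range(i + 1, n)),
--                    key=lambda e: e[0])
--     parent = {}   # vertex -> parent in the union-find forest; missing key = self root
--     size = {}     # root -> component size
--     def find(x):
--         while parent.get(x, x) != x:
--             x = parent[x]
--         return x
--     deg = {}
--     chosen = []   # accepted edges, in acceptance order
--     for w, u, v in edges:
--         if deg.get(u, 0) < 2 and deg.get(v, 0) < 2:
--             ru, rv = find(u), find(v)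
--             if ru != rv:
--                 if size.get(ru, 1) < size.get(rv, 1):
--                     ru, rv = rv, ru
--                 parent[rv] = ru
--                 size[ru] = size.get(ru, 1) + size.get(rv, 1)
--                 deg[u] = deg.get(u, 0) + 1
--                 deg[v] = deg.get(v, 0) + 1
--                 chosen.append((u, v))
--     out = []
--     for u, v in chosen:
--         if u not in out:
--             out.append(u)
--         if v not in out:
--             out.append(v)
--     return out
-- ===== Notes on version B (the rewrite author's own statement) =====
-- stated objective: faster
-- what changed: B restructures the computation into two stages: a Kruskal pass that tests connectivity with a union-find forest (union by size, iterative root walk) and maintains degrees in a dict, collecting the accepted edges only, then a separate first-occurrence pass over the accepted edges' endpoints that produces the returned vertex order; A's per-edge partition-list scans, accepted-edge-list rescans and early break disappear.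
import Mathlib
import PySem

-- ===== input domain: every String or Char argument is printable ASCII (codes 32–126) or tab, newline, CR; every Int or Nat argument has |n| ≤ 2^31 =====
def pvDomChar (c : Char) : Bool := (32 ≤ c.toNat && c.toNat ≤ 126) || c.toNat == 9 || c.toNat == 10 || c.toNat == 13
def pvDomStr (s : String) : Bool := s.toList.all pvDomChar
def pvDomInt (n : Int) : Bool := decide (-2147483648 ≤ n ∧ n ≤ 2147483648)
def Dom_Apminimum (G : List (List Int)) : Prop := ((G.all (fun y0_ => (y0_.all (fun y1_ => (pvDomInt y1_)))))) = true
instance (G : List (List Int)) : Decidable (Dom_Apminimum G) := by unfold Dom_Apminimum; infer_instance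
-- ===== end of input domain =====

-- B replaces A's in-place partition-list merging and per-edge rescans by a union-find forest
-- (union by size, iterative root walk) and derives the returned vertex order in a separate
-- second pass over the accepted edges; it also drops A's early break (provably redundant for
-- the returned value).  A mutates nothing observable; the equivalence is about the return value.

-- ===== PORT A =====
-- g_to_triple: nested index loops building [i+1, j+1, G[i][j]] triples (j from i, skipping i = j)
def gToTriple (G : List (List Int)) : List (Int × Int × Int) :=
  (PySem.List.pyRange 0 (G.length) 1).foldl (fun L i =>
    (PySem.List.pyRange i (G.length) 1).foldl (fun L j =>
      if i ≠ j then
        -- G[i][j]; Pre_Apminimum guarantees the indices are in range (Python raises IndexError otherwise)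
        L ++ [(i + 1, j + 1, PySem.List.pyGetD (PySem.List.pyGetD G i []) j 0)]
      else L) L) []

def takeValue (e : Int × Int × Int) : Int := e.2.2

def listThatContains (s : Int) (L : List (List Int)) : Option (List Int) :=
  match L with
  | [] => none
  | i :: rest => if s ∈ i then some i else listThatContains s rest

def listCount (s : Int) (L : List (Int × Int × Int)) : Int :=
  L.foldl (fun deg a => if s = a.1 ∨ s = a.2.1 then deg + 1 else deg) 0

-- the 'for w in aretes' loop; state (L_s, L_a, Lss).  A's final block (entered when
-- len(L_a) == len(G)-1, the break) only appends to L_a, which is not returned: the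
-- function returns Lss, so the break returns Lss unchanged.
def loopA (nm1 : Int) (aretes : List (Int × Int × Int)) (Ls : List (List Int))
    (La : List (Int × Int × Int)) (Lss : List Int) : List Int :=
  match aretes with
  | [] => Lss
  | w :: rest =>
    let l1 := listThatContains w.1 Ls
    let l2 := listThatContains w.2.1 Ls
    let st :=
      if listCount w.1 La < 2 ∧ listCount w.2.1 La < 2 then
        if l1 ≠ l2 then
          let La' := La ++ [w]
          let Lss' := if w.1 ∈ Lss then Lss else Lss ++ [w.1]
          let Lss'' := if w.2.1 ∈ Lss' then Lss' else Lss' ++ [w.2.1]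
          -- l1.extend(l2) mutates the member of L_s in place; then L_s.remove(l2).
          -- l1/l2 are always 'some' here and l2 is always present (s1, s2 come from edges over
          -- vertices 1..n, all of which L_s partitions), so the getD defaults are never taken.
          let l1v := l1.getD []
          let l2v := l2.getD []
          let mapped := Ls.map (fun l => if l = l1v then l1v ++ l2v else l)
          let Ls' := (PySem.List.remove? mapped l2v).getD mapped
          (Ls', La', Lss'')
        else (Ls, La, Lss)
      else (Ls, La, Lss)
    if (st.2.1.length : Int) = nm1 then st.2.2
    else loopA nm1 rest st.1 st.2.1 st.2.2

def Apminimum (G : List (List Int)) : List Int :=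
  let aretes := PySem.List.sorted (gToTriple G) takeValue
  -- for i in range(0, len(G)): L_s.append([i+1])
  let Ls := (PySem.List.pyRange 0 (G.length) 1).foldl (fun L i => L ++ [[i + 1]]) []
  loopA ((G.length : Int) - 1) aretes Ls [] []

-- ===== PORT B =====
-- find(x): while parent.get(x, x) != x: x = parent[x].  Ported with fuel: the chain length is
-- bounded by the number of unions performed, which is < n, so fuel n is exact on every state
-- the program reaches (proved via the rootedBy invariant below).
def findRoot (fuel : Nat) (parent : PySem.Dict Int Int) (x : Int) : Int :=
  match fuel with
  | 0 => x
  | f + 1 =>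
    let p := parent.getD x x
    if p = x then x else findRoot f parent p

-- stage 1: the edge loop of Source B; state (parent, size, deg, chosen)
def loopB (fuel : Nat) (edges : List (Int × Int × Int))
    (parent size deg : PySem.Dict Int Int) (chosen : List (Int × Int)) : List (Int × Int) :=
  match edges with
  | [] => chosen
  | e :: rest =>
    let u := e.2.1
    let v := e.2.2
    if deg.getD u 0 < 2 ∧ deg.getD v 0 < 2 then
      let r1 := findRoot fuel parent u
      let r2 := findRoot fuel parent v
      if r1 ≠ r2 then
        -- if size.get(ru,1) < size.get(rv,1): ru, rv = rv, ru
        let ru := if size.getD r1 1 < size.getD r2 1 then r2 else r1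
        let rv := if size.getD r1 1 < size.getD r2 1 then r1 else r2
        let parent' := parent.insert rv ru
        let size' := size.insert ru (size.getD ru 1 + size.getD rv 1)
        let d1 := deg.insert u (deg.getD u 0 + 1)
        let d2 := d1.insert v (d1.getD v 0 + 1)
        loopB fuel rest parent' size' d2 (chosen ++ [(u, v)])
      else loopB fuel rest parent size deg chosen
    else loopB fuel rest parent size deg chosen

-- stage 2: first-occurrence pass over the accepted edges' endpoints
def buildOrder (chosen : List (Int × Int)) : List Int :=
  chosen.foldl (fun out e =>
    let out1 := if e.1 ∈ out then out else out ++ [e.1]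
    if e.2 ∈ out1 then out1 else out1 ++ [e.2]) []

def Apminimum_alt (G : List (List Int)) : List Int :=
  let n := G.length
  let edges := PySem.List.sorted
    ((List.range n).flatMap (fun (i : Nat) => (List.range' (i+1) (n - (i+1))).map (fun (j : Nat) =>
       (PySem.List.pyGetD (PySem.List.pyGetD G (i : Int) []) (j : Int) 0, (i : Int) + 1, (j : Int) + 1))))
    (fun e => e.1)
  buildOrder (loopB n edges PySem.Dict.empty PySem.Dict.empty PySem.Dict.empty [])

-- ===== PRECONDITION & SPEC =====
-- Pre_ excludes exactly the inputs on which Python A raises IndexError (a non-final row shorter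
-- than the matrix, read as G[i][j]); B raises there too.  The last row is never indexed.
def Pre_Apminimum (G : List (List Int)) : Prop :=
  ∀ r ∈ G.dropLast, (G.length : Int) ≤ r.length
instance (G : List (List Int)) : Decidable (Pre_Apminimum G) := by unfold Pre_Apminimum; infer_instance

def pvWitness_Apminimum : List (List Int) := [[0, 4, 1], [4, 0, 2], [1, 2, 0]]

def Spec_Apminimum (G : List (List Int)) (out : List Int) : Prop := out = Apminimum_alt G
instance (G : List (List Int)) (out : List Int) : Decidable (Spec_Apminimum G out) := by unfold Spec_Apminimum; infer_instance

-- ===== CLAIM (what is proved, stated in full; the proofs are below) =====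
def Claim_equal_Apminimum : Prop := ∀ (G : List (List Int)), Dom_Apminimum G → Pre_Apminimum G → Spec_Apminimum G (Apminimum G)

-- ===== LEMMAS AND PROOFS =====

-- ---------- sorted commutes with map (same keys, stable) ----------

lemma insertBy_map {A B : Type} (f : A → B) (bf : A → A → Bool) (bg : B → B → Bool)
    (h : ∀ a b, bg (f a) (f b) = bf a b) (x : A) (ys : List A) :
    PySem.List.insertBy bg (f x) (ys.map f) = (PySem.List.insertBy bf x ys).map f := by
  induction ys with
  | nil => simp [PySem.List.insertBy]
  | cons y ys ih =>
    simp only [List.map_cons, PySem.List.insertBy, h x y]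
    by_cases hb : bf x y
    · simp [hb]
    · simp [hb, ih]

lemma sorted_map_swap {A B : Type} (f : A → B) (xs : List A) (key : B → Int) :
    PySem.List.sorted (xs.map f) key = (PySem.List.sorted xs (fun a => key (f a))).map f := by
  rw [PySem.List.sorted_eq_foldl_insertBy, PySem.List.sorted_eq_foldl_insertBy, List.foldl_map]
  suffices h : ∀ acc : List A,
      xs.foldl (fun acc a => PySem.List.insertBy (fun a b => decide (key a < key b)) (f a) acc) (acc.map f)
        = (xs.foldl (fun acc a => PySem.List.insertBy (fun a b => decide (key (f a) < key (f b))) a acc) acc).map f by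
    simpa using h []
  induction xs with
  | nil => intro acc; rfl
  | cons x xs ih =>
    intro acc
    simp only [List.foldl_cons]
    rw [insertBy_map f _ _ (fun a b => rfl), ih]

-- ---------- canonical form of the edge list ----------

def wAt (G : List (List Int)) (i j : Int) : Int :=
  PySem.List.pyGetD (PySem.List.pyGetD G i []) j 0

def bSwap (e : Int × Int × Int) : Int × Int × Int := (e.2.2, e.1, e.2.1)

def canonEdges (G : List (List Int)) : List (Int × Int × Int) :=
  (List.range G.length).flatMap (fun (i : Nat) =>
    (List.range (G.length - (i+1))).map (fun (k : Nat) =>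
      ((i : Int) + 1, (i : Int) + (k : Int) + 2, wAt G (i : Int) ((i : Int) + (k : Int) + 1))))

lemma gToTriple_eq (G : List (List Int)) : gToTriple G = canonEdges G := by
  unfold gToTriple canonEdges
  rw [PySem.List.pyRange_zero_nat, List.foldl_map]
  rw [PySem.List.foldl_congr_mem _ _
    (fun (acc : List (Int × Int × Int)) (i : Nat) => acc ++
      (List.range (G.length - (i+1))).map (fun (k : Nat) =>
        ((i : Int) + 1, (i : Int) + (k : Int) + 2, wAt G (i : Int) ((i : Int) + (k : Int) + 1)))) _ ?_]
  · rw [PySem.List.foldl_append_eq_flatMap]; simp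
  · intro acc i hi
    rw [List.mem_range] at hi
    rw [PySem.List.pyRange_one_cons (by exact_mod_cast hi)]
    simp only [List.foldl_cons, ne_eq, not_true_eq_false, if_false]
    rw [PySem.List.foldl_congr_mem _ _
      (fun (acc : List (Int × Int × Int)) (j : Int) => acc ++ [((i:Int) + 1, j + 1, wAt G i j)]) _ ?_]
    · rw [PySem.List.foldl_append_singleton_eq_map, PySem.List.pyRange_one]
      congr 1
      rw [List.map_map]
      have hlen : (((G.length : Int)) - ((i:Int) + 1)).toNat = G.length - (i+1) := by omega
      rw [hlen]
      apply List.map_congr_left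
      intro k _
      simp only [Function.comp]
      refine Prod.ext rfl (Prod.ext ?_ ?_) <;> simp [wAt] <;> ring_nf
    · intro acc j hj
      rw [PySem.List.mem_pyRange_one] at hj
      have : (i : Int) ≠ j := by omega
      simp [this, wAt]

lemma canon_mem {G : List (List Int)} {e : Int × Int × Int} (he : e ∈ canonEdges G) :
    1 ≤ e.1 ∧ e.1 < e.2.1 ∧ e.2.1 ≤ (G.length : Int) := by
  simp only [canonEdges, List.mem_flatMap, List.mem_map, List.mem_range] at he
  obtain ⟨i, hi, k, hk, rfl⟩ := he
  simp only []
  omega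

-- ---------- listThatContains toolkit ----------

def disjL (a b : List Int) : Prop := ∀ x : Int, x ∈ a → x ∉ b

lemma disjL_symm {a b : List Int} (h : disjL a b) : disjL b a :=
  fun x hb ha => h x ha hb

lemma LTC_eq_none {s : Int} {X : List (List Int)} :
    listThatContains s X = none ↔ ∀ l ∈ X, s ∉ l := by
  induction X with
  | nil => simp [listThatContains]
  | cons i rest ih =>
    by_cases h : s ∈ i
    · constructor
      · intro hc; simp [listThatContains, h] at hc
      · intro hall; exact absurd h (hall i List.mem_cons_self)
    · simp [listThatContains, h, ih]

lemma LTC_some {s : Int} {X : List (List Int)} {l : List Int}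
    (h : listThatContains s X = some l) : l ∈ X ∧ s ∈ l := by
  induction X with
  | nil => simp [listThatContains] at h
  | cons i rest ih =>
    by_cases hi : s ∈ i
    · simp [listThatContains, hi] at h
      subst h; exact ⟨List.mem_cons_self, hi⟩
    · simp only [listThatContains, hi, if_false] at h
      obtain ⟨hm, hs⟩ := ih h
      exact ⟨List.mem_cons_of_mem _ hm, hs⟩

lemma LTC_first {s : Int} {X : List (List Int)} (hpw : X.Pairwise disjL)
    {l : List Int} (hl : l ∈ X) (hs : s ∈ l) : listThatContains s X = some l := by
  induction X with
  | nil => simp at hl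
  | cons i rest ih =>
    obtain ⟨hdi, hrest⟩ := List.pairwise_cons.mp hpw
    rcases List.mem_cons.mp hl with rfl | hl'
    · simp [listThatContains, hs]
    · have hsi : s ∉ i := fun hsi => hdi l hl' s hsi hs
      simp only [listThatContains, hsi, if_false]
      exact ih hrest hl'

-- ---------- the in-place merge step (l1.extend(l2); L_s.remove(l2)) ----------

lemma remove_append {l2v : List Int} {P T : List (List Int)} (hnp : l2v ∉ P) :
    PySem.List.remove? (P ++ l2v :: T) l2v = some (P ++ T) := by
  induction P with
  | nil => simp [PySem.List.remove?_cons_self]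
  | cons p P ih =>
    have hp : p ≠ l2v := fun h => hnp (h ▸ List.mem_cons_self)
    have hnp' : l2v ∉ P := fun h => hnp (List.mem_cons_of_mem _ h)
    rw [List.cons_append, PySem.List.remove?_cons_of_ne _ hp, ih hnp']
    rfl

lemma permA {α : Type} (P Q R : List α) (a b : α) :
    ((P ++ a :: Q) ++ b :: R).Perm (b :: a :: (P ++ Q ++ R)) := by
  refine List.Perm.trans List.perm_middle (List.Perm.cons _ ?_)
  have h : (P ++ a :: Q) ++ R = P ++ a :: (Q ++ R) := by simp
  rw [h]
  refine List.Perm.trans List.perm_middle ?_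
  rw [← List.append_assoc]

lemma permB {α : Type} (P Q R : List α) (a b : α) :
    (P ++ a :: (Q ++ b :: R)).Perm (a :: b :: (P ++ Q ++ R)) := by
  refine List.Perm.trans List.perm_middle (List.Perm.cons _ ?_)
  have h : P ++ (Q ++ b :: R) = (P ++ Q) ++ b :: R := by simp
  rw [h]
  exact List.perm_middle

lemma permC {α : Type} (P Q R : List α) (a : α) :
    (P ++ (Q ++ a :: R)).Perm (a :: (P ++ Q ++ R)) := by
  have h : P ++ (Q ++ a :: R) = (P ++ Q) ++ a :: R := by simp
  rw [h]
  exact List.perm_middle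

lemma permD {α : Type} (P Q R : List α) (a : α) :
    ((P ++ a :: Q) ++ R).Perm (a :: (P ++ Q ++ R)) := by
  have h : (P ++ a :: Q) ++ R = P ++ a :: (Q ++ R) := by simp
  rw [h]
  refine List.Perm.trans List.perm_middle ?_
  rw [← List.append_assoc]

-- Ls' is l1v's slot overwritten with l1v ++ l2v and l2v's slot removed: up to permutation,
-- (l1v ++ l2v) replaces the two lists l1v, l2v.
lemma update_perm {Ls : List (List Int)} {l1v l2v : List Int}
    (hpw : Ls.Pairwise disjL) {u v : Int} (hu : u ∈ l1v) (hv : v ∈ l2v)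
    (h1 : l1v ∈ Ls) (h2 : l2v ∈ Ls) (hne : l1v ≠ l2v) :
    ∃ M : List (List Int),
      ((PySem.List.remove? (Ls.map (fun l => if l = l1v then l1v ++ l2v else l)) l2v).getD
          (Ls.map (fun l => if l = l1v then l1v ++ l2v else l))).Perm ((l1v ++ l2v) :: M)
      ∧ Ls.Perm (l1v :: l2v :: M) := by
  have hmerged_ne : l1v ++ l2v ≠ l2v := by
    intro h
    have hlen := congrArg List.length h
    rw [List.length_append] at hlen
    have h0 : l1v.length = 0 := by omega
    rw [List.length_eq_zero_iff] at h0
    subst h0; simp at hu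
  have key : ∀ {X Y : List (List Int)} {a b : List Int} {w : Int},
      (X ++ a :: Y).Pairwise disjL → w ∈ a → b ∈ X ++ Y → b ≠ a := by
    intro X Y a b w hp hw hb hEq
    subst hEq
    rcases List.mem_append.mp hb with hbX | hbY
    · exact (List.pairwise_append.mp hp).2.2 b hbX b List.mem_cons_self w hw hw
    · exact (List.pairwise_cons.mp (List.pairwise_append.mp hp).2.1).1 b hbY w hw hw
  obtain ⟨S, T, rfl⟩ := List.append_of_mem h1
  have h2' := h2
  rw [List.mem_append, List.mem_cons] at h2'
  rcases h2' with h2S | h2eq | h2T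
  · -- l2v occurs before l1v
    obtain ⟨P, Q, rfl⟩ := List.append_of_mem h2S
    have hno1 : ∀ b ∈ (P ++ l2v :: Q) ++ T, b ≠ l1v := fun b hb => key hpw hu hb
    have hpw' : (P ++ l2v :: (Q ++ l1v :: T)).Pairwise disjL := by simpa using hpw
    have hno2 : l2v ∉ P := fun hb =>
      key hpw' hv (List.mem_append_left _ hb) rfl
    refine ⟨P ++ Q ++ T, ?_, ?_⟩
    · have hmap : ((P ++ l2v :: Q) ++ l1v :: T).map (fun l => if l = l1v then l1v ++ l2v else l)
          = P ++ l2v :: (Q ++ (l1v ++ l2v) :: T) := by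
        rw [List.map_append, List.map_cons, if_pos rfl]
        have e1 : (P ++ l2v :: Q).map (fun l => if l = l1v then l1v ++ l2v else l)
            = P ++ l2v :: Q := by
          refine (List.map_congr_left ?_).trans (List.map_id _)
          intro a ha
          exact if_neg (hno1 a (List.mem_append_left _ ha))
        have e2 : T.map (fun l => if l = l1v then l1v ++ l2v else l) = T := by
          refine (List.map_congr_left ?_).trans (List.map_id _)
          intro a ha
          exact if_neg (hno1 a (List.mem_append_right _ ha))
        rw [e1, e2]
        simp
      rw [hmap, remove_append hno2]
      simpa using permC P Q T (l1v ++ l2v)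
    · simpa using permA P Q T l2v l1v
  · exact absurd h2eq.symm hne
  · -- l2v occurs after l1v
    obtain ⟨Q, R, rfl⟩ := List.append_of_mem h2T
    have hno1 : ∀ b ∈ S ++ (Q ++ l2v :: R), b ≠ l1v := fun b hb => key hpw hu hb
    have hno2 : l2v ∉ S ++ (l1v ++ l2v) :: Q := by
      intro hb
      have hpwQ : ((S ++ l1v :: Q) ++ l2v :: R).Pairwise disjL := by simpa using hpw
      rcases List.mem_append.mp hb with hbS | hbC
      · exact key hpwQ hv (by simp [hbS]) rfl
      · rcases List.mem_cons.mp hbC with hEq | hbQ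
        · exact hmerged_ne hEq.symm
        · exact key hpwQ hv (by simp [hbQ]) rfl
    refine ⟨S ++ Q ++ R, ?_, ?_⟩
    · have hmap : (S ++ l1v :: (Q ++ l2v :: R)).map (fun l => if l = l1v then l1v ++ l2v else l)
          = (S ++ (l1v ++ l2v) :: Q) ++ l2v :: R := by
        rw [List.map_append, List.map_cons, if_pos rfl]
        have e1 : S.map (fun l => if l = l1v then l1v ++ l2v else l) = S := by
          refine (List.map_congr_left ?_).trans (List.map_id _)
          intro a ha
          exact if_neg (hno1 a (List.mem_append_left _ ha))
        have e2 : (Q ++ l2v :: R).map (fun l => if l = l1v then l1v ++ l2v else l)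
            = Q ++ l2v :: R := by
          refine (List.map_congr_left ?_).trans (List.map_id _)
          intro a ha
          exact if_neg (hno1 a (List.mem_append_right _ ha))
        rw [e1, e2]
        simp
      rw [hmap, remove_append hno2]
      exact (Option.getD_some ▸ permD S Q R (l1v ++ l2v))
    · simpa using permB S Q R l1v l2v

lemma update_facts {Ls M Ls' : List (List Int)} {l1v l2v : List Int}
    (hpw : Ls.Pairwise disjL)
    (hperm' : Ls'.Perm ((l1v ++ l2v) :: M))
    (hperm : Ls.Perm (l1v :: l2v :: M)) :
    Ls'.Pairwise disjL
    ∧ (∀ l, l ∈ Ls' ↔ l = l1v ++ l2v ∨ l ∈ M)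
    ∧ (∀ l, l ∈ Ls ↔ l = l1v ∨ l = l2v ∨ l ∈ M) := by
  have hsym : ∀ {x y : List Int}, disjL x y → disjL y x := fun h => disjL_symm h
  have hLs : (l1v :: l2v :: M).Pairwise disjL := (hperm.pairwise_iff hsym).mp hpw
  obtain ⟨d1, hLs2⟩ := List.pairwise_cons.mp hLs
  obtain ⟨d2, hM⟩ := List.pairwise_cons.mp hLs2
  refine ⟨?_, ?_, ?_⟩
  · refine (hperm'.pairwise_iff hsym).mpr (List.pairwise_cons.mpr ⟨?_, hM⟩)
    intro b hb x hx
    rcases List.mem_append.mp hx with hx1 | hx2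
    · exact d1 b (List.mem_cons_of_mem _ hb) x hx1
    · exact d2 b hb x hx2
  · intro l
    rw [hperm'.mem_iff, List.mem_cons]
  · intro l
    rw [hperm.mem_iff, List.mem_cons, List.mem_cons]

lemma LTC_update {Ls M Ls' : List (List Int)} {l1v l2v : List Int}
    (hpw : Ls.Pairwise disjL)
    (hperm' : Ls'.Perm ((l1v ++ l2v) :: M))
    (hperm : Ls.Perm (l1v :: l2v :: M)) (s : Int) :
    listThatContains s Ls'
      = if s ∈ l1v ∨ s ∈ l2v then some (l1v ++ l2v) else listThatContains s Ls := by
  obtain ⟨hpw', hmem', hmem⟩ := update_facts hpw hperm' hperm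
  by_cases hs : s ∈ l1v ∨ s ∈ l2v
  · rw [if_pos hs]
    exact LTC_first hpw' ((hmem' _).mpr (Or.inl rfl)) (List.mem_append.mpr hs)
  · rw [if_neg hs]
    push Not at hs
    cases hx : listThatContains s Ls with
    | some l =>
      obtain ⟨hlm, hsl⟩ := LTC_some hx
      rcases (hmem l).mp hlm with rfl | rfl | hlM
      · exact absurd hsl hs.1
      · exact absurd hsl hs.2
      · exact LTC_first hpw' ((hmem' _).mpr (Or.inr hlM)) hsl
    | none =>
      rw [LTC_eq_none] at hx ⊢
      intro l hl
      rcases (hmem' l).mp hl with rfl | hlM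
      · intro hc
        rcases List.mem_append.mp hc with h | h
        · exact hs.1 h
        · exact hs.2 h
      · exact hx l ((hmem l).mpr (Or.inr (Or.inr hlM)))

-- ---------- listCount helpers ----------

lemma listCount_eq (s : Int) (L : List (Int × Int × Int)) :
    listCount s L = ((L.countP (fun a => decide (s = a.1) || decide (s = a.2.1)) : Nat) : Int) := by
  unfold listCount
  rw [PySem.List.foldl_congr_mem L _
    (fun (acc : Int) (x : Int × Int × Int) =>
      if (decide (s = x.1) || decide (s = x.2.1)) = true then acc + 1 else acc) 0 ?_]
  · rw [PySem.List.foldl_count_if]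
    ring
  · intro acc x _
    by_cases h : s = x.1 ∨ s = x.2.1
    · rcases h with h | h <;> simp [h]
    · push Not at h
      simp [h.1, h.2]

lemma listCount_append (s : Int) (L : List (Int × Int × Int)) (w : Int × Int × Int) :
    listCount s (L ++ [w]) = listCount s L + (if s = w.1 ∨ s = w.2.1 then 1 else 0) := by
  rw [listCount_eq, listCount_eq, List.countP_append]
  by_cases h : s = w.1 ∨ s = w.2.1
  · rcases h with h | h <;> simp [h]
  · push Not at h
    simp [h.1, h.2]

-- ---------- findRoot (union-find) toolkit ----------

-- with fuel k, the walk from s reaches a fixed point of the parent map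
def rootedBy (p : PySem.Dict Int Int) (s : Int) (k : Nat) : Prop :=
  p.getD (findRoot k p s) (findRoot k p s) = findRoot k p s

lemma findRoot_fix {p : PySem.Dict Int Int} {x : Int} (h : p.getD x x = x) (f : Nat) :
    findRoot f p x = x := by
  cases f with
  | zero => rfl
  | succ f => simp [findRoot, h]

lemma findRoot_add (p : PySem.Dict Int Int) (a b : Nat) (s : Int) :
    findRoot (a + b) p s = findRoot b p (findRoot a p s) := by
  induction a generalizing s with
  | zero => simp [findRoot]
  | succ a ih =>
    rw [Nat.succ_add]
    by_cases h : p.getD s s = s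
    · rw [findRoot_fix h, findRoot_fix h, findRoot_fix h]
    · show findRoot ((a + b) + 1) p s = findRoot b p (findRoot (a + 1) p s)
      have h1 : findRoot ((a + b) + 1) p s = findRoot (a + b) p (p.getD s s) := by
        simp [findRoot, h]
      have h2 : findRoot (a + 1) p s = findRoot a p (p.getD s s) := by
        simp [findRoot, h]
      rw [h1, h2, ih]

lemma rooted_stable {p : PySem.Dict Int Int} {s : Int} {k : Nat}
    (h : rootedBy p s k) {m : Nat} (hm : k ≤ m) : findRoot m p s = findRoot k p s := by
  have : m = k + (m - k) := by omega
  rw [this, findRoot_add, findRoot_fix h]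

lemma rooted_mono {p : PySem.Dict Int Int} {s : Int} {k : Nat}
    (h : rootedBy p s k) {m : Nat} (hm : k ≤ m) : rootedBy p s m := by
  unfold rootedBy
  rw [rooted_stable h hm]
  exact h

-- union step: insert a root x pointing to another root y; every walk gets at most one step
-- longer and the roots are renamed x ↦ y
lemma union_update {p : PySem.Dict Int Int} {x y : Int}
    (hx : p.getD x x = x) (hy : p.getD y y = y) (hxy : x ≠ y) :
    ∀ (k : Nat) (s : Int), rootedBy p s k →
      rootedBy (p.insert x y) s (k + 1) ∧
      findRoot (k + 1) (p.insert x y) s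
        = (if findRoot k p s = x then y else findRoot k p s) := by
  intro k
  induction k with
  | zero =>
    intro s hs
    have hroot : p.getD s s = s := hs
    by_cases hsx : s = x
    · subst hsx
      have hg : (p.insert s y).getD s s = y := by rw [PySem.Dict.getD_insert]; simp
      have h1 : findRoot 1 (p.insert s y) s = y := by
        simp [findRoot, hg, (Ne.symm hxy)]
      refine ⟨?_, ?_⟩
      · unfold rootedBy
        rw [h1, PySem.Dict.getD_insert, if_neg (Ne.symm hxy), hy]
      · rw [h1]; simp [findRoot]
    · have hg : (p.insert x y).getD s s = s := by
        rw [PySem.Dict.getD_insert, if_neg hsx]; exact hroot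
      have h1 : findRoot 1 (p.insert x y) s = s := findRoot_fix hg 1
      refine ⟨?_, ?_⟩
      · unfold rootedBy; rw [h1, hg]
      · rw [h1]; simp [findRoot, hsx]
  | succ k ih =>
    intro s hs
    by_cases h0 : p.getD s s = s
    · have hs0 : rootedBy p s 0 := h0
      obtain ⟨hr1, hv1⟩ := ih s (by
        unfold rootedBy
        rw [rooted_stable hs0 (Nat.zero_le k)]
        exact h0)
      have hv1' : findRoot (k + 1) (p.insert x y) s
          = if findRoot (k + 1) p s = x then y else findRoot (k + 1) p s := by
        rw [hv1, rooted_stable hs0 (Nat.zero_le (k+1)), rooted_stable hs0 (Nat.zero_le k)]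
      refine ⟨?_, ?_⟩
      · exact rooted_mono hr1 (by omega)
      · rw [rooted_stable hr1 (by omega : k + 1 ≤ k + 1 + 1), hv1']
    · have hsx : s ≠ x := fun h => h0 (h ▸ hx)
      have hstep : findRoot (k + 1 + 1) (p.insert x y) s
          = findRoot (k + 1) (p.insert x y) (p.getD s s) := by
        have hg : (p.insert x y).getD s s = p.getD s s := by
          rw [PySem.Dict.getD_insert, if_neg hsx]
        simp [findRoot, hg, h0]
      have hstepp : findRoot (k + 1) p s = findRoot k p (p.getD s s) := by
        simp [findRoot, h0]
      have hrp : rootedBy p (p.getD s s) k := by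
        unfold rootedBy
        rw [← hstepp]
        exact hs
      obtain ⟨hr, hv⟩ := ih (p.getD s s) hrp
      refine ⟨?_, ?_⟩
      · unfold rootedBy
        rw [hstep]
        exact hr
      · rw [hstep, hv, hstepp]

-- ---------- coupling invariant between A's and B's loop states ----------

structure InvS (n : Nat) (Ls : List (List Int)) (La : List (Int × Int × Int)) (Lss : List Int)
    (parent deg : PySem.Dict Int Int) (chosen : List (Int × Int)) : Prop where
  hLss : Lss = buildOrder chosen
  hlen : Ls.length + La.length = n
  hne : ∀ l ∈ Ls, l ≠ []
  hpw : Ls.Pairwise disjL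
  hcov : ∀ s : Int, 1 ≤ s → s ≤ (n : Int) → ∃ l ∈ Ls, s ∈ l
  hcnt : ∀ s : Int, 1 ≤ s → s ≤ (n : Int) → listCount s La = deg.getD s 0
  hroot : ∀ s : Int, 1 ≤ s → s ≤ (n : Int) → rootedBy parent s La.length
  hcc : ∀ s t : Int, 1 ≤ s → s ≤ (n : Int) → 1 ≤ t → t ≤ (n : Int) →
      (listThatContains s Ls = listThatContains t Ls
        ↔ findRoot n parent s = findRoot n parent t)

lemma loopB_noop (fuel : Nat) (l : List (Int × Int × Int)) (p sz d : PySem.Dict Int Int)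
    (ch : List (Int × Int)) (h : ∀ e ∈ l, findRoot fuel p e.2.1 = findRoot fuel p e.2.2) :
    loopB fuel l p sz d ch = ch := by
  induction l with
  | nil => rfl
  | cons e rest ih =>
    have he := h e List.mem_cons_self
    have hrest : ∀ e ∈ rest, findRoot fuel p e.2.1 = findRoot fuel p e.2.2 :=
      fun e' he' => h e' (List.mem_cons_of_mem _ he')
    simp only [loopB, he, ne_eq, not_true_eq_false, if_false, ite_self]
    exact ih hrest

lemma buildOrder_append (ch : List (Int × Int)) (e : Int × Int) :
    buildOrder (ch ++ [e])
      = (let out1 := if e.1 ∈ buildOrder ch then buildOrder ch else buildOrder ch ++ [e.1]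
         if e.2 ∈ out1 then out1 else out1 ++ [e.2]) := by
  unfold buildOrder
  rw [List.foldl_append]
  rfl

lemma loop_eq {n : Nat} (l : List (Int × Int × Int))
    (hend : ∀ e ∈ l, 1 ≤ e.1 ∧ e.1 < e.2.1 ∧ e.2.1 ≤ (n : Int))
    (Ls : List (List Int)) (La : List (Int × Int × Int)) (Lss : List Int)
    (parent size deg : PySem.Dict Int Int) (chosen : List (Int × Int))
    (inv : InvS n Ls La Lss parent deg chosen)
    (hnb : l ≠ [] → (La.length : Int) ≠ (n : Int) - 1) :
    loopA ((n : Int) - 1) l Ls La Lss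
      = buildOrder (loopB n (l.map bSwap) parent size deg chosen) := by
  induction l generalizing Ls La Lss parent size deg chosen with
  | nil => simpa [loopA, loopB] using inv.hLss
  | cons w rest ih =>
    obtain ⟨hu1, huv, hvn⟩ := hend w List.mem_cons_self
    have hun : w.1 ≤ (n : Int) := by omega
    have hv1 : 1 ≤ w.2.1 := by omega
    have hneuv : w.1 ≠ w.2.1 := by omega
    have htk : (La.length : Int) ≠ (n : Int) - 1 := hnb (List.cons_ne_nil _ _)
    have hbreakA : ¬ ((La.length : Int) = (n : Int) - 1) := htk
    have hend' : ∀ e ∈ rest, 1 ≤ e.1 ∧ e.1 < e.2.1 ∧ e.2.1 ≤ (n : Int) :=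
      fun e he => hend e (List.mem_cons_of_mem _ he)
    have hu_cnt : listCount w.1 La = deg.getD w.1 0 := inv.hcnt _ hu1 hun
    have hv_cnt : listCount w.2.1 La = deg.getD w.2.1 0 := inv.hcnt _ hv1 hvn
    have hccuv := inv.hcc w.1 w.2.1 hu1 hun hv1 hvn
    rw [List.map_cons]
    show loopA _ (w :: rest) Ls La Lss
      = buildOrder (loopB n (bSwap w :: rest.map bSwap) parent size deg chosen)
    by_cases hdeg : listCount w.1 La < 2 ∧ listCount w.2.1 La < 2
    · have hBdeg : deg.getD w.1 0 < 2 ∧ deg.getD w.2.1 0 < 2 := by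
        rw [← hu_cnt, ← hv_cnt]; exact hdeg
      by_cases hll : listThatContains w.1 Ls = listThatContains w.2.1 Ls
      · -- same component: both sides skip the edge
        have hr : findRoot n parent w.1 = findRoot n parent w.2.1 := hccuv.mp hll
        simp only [loopA, loopB, bSwap]
        rw [if_pos hdeg,
          if_neg (show ¬(listThatContains w.1 Ls ≠ listThatContains w.2.1 Ls) from
            fun hc => hc hll),
          if_neg hbreakA, if_pos hBdeg,
          if_neg (show ¬(findRoot n parent w.1 ≠ findRoot n parent w.2.1) from
            fun hc => hc hr)]
        exact ih hend' _ _ _ _ _ _ _ inv (fun _ => htk)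
      · -- accepted edge
        have hrne : findRoot n parent w.1 ≠ findRoot n parent w.2.1 :=
          fun h => hll (hccuv.mpr h)
        obtain ⟨l1v, hl1mem, hul1⟩ := inv.hcov w.1 hu1 hun
        obtain ⟨l2v, hl2mem, hvl2⟩ := inv.hcov w.2.1 hv1 hvn
        have hρu : listThatContains w.1 Ls = some l1v := LTC_first inv.hpw hl1mem hul1
        have hρv : listThatContains w.2.1 Ls = some l2v := LTC_first inv.hpw hl2mem hvl2
        have hl12 : l1v ≠ l2v := fun h => hll (by rw [hρu, hρv, h])
        obtain ⟨M, hperm', hperm⟩ := update_perm inv.hpw hul1 hvl2 hl1mem hl2mem hl12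
        obtain ⟨hpw', hmem', hmemM⟩ := update_facts inv.hpw hperm' hperm
        have hLsl : Ls.length = M.length + 2 := by simpa using hperm.length_eq
        have hkn : La.length + 1 ≤ n := by have := inv.hlen; omega
        have hknn : La.length ≤ n := by omega
        have hr1root : parent.getD (findRoot n parent w.1) (findRoot n parent w.1)
            = findRoot n parent w.1 := by
          rw [rooted_stable (inv.hroot w.1 hu1 hun) hknn]
          exact inv.hroot w.1 hu1 hun
        have hr2root : parent.getD (findRoot n parent w.2.1) (findRoot n parent w.2.1)
            = findRoot n parent w.2.1 := by
          rw [rooted_stable (inv.hroot w.2.1 hv1 hvn) hknn]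
          exact inv.hroot w.2.1 hv1 hvn
        -- union-by-size direction: xx is the inserted key, yy the surviving root
        set xx := if size.getD (findRoot n parent w.1) 1 < size.getD (findRoot n parent w.2.1) 1
          then findRoot n parent w.1 else findRoot n parent w.2.1 with hxxdef
        set yy := if size.getD (findRoot n parent w.1) 1 < size.getD (findRoot n parent w.2.1) 1
          then findRoot n parent w.2.1 else findRoot n parent w.1 with hyydef
        have hset : (xx = findRoot n parent w.1 ∧ yy = findRoot n parent w.2.1)
            ∨ (xx = findRoot n parent w.2.1 ∧ yy = findRoot n parent w.1) := by
          rw [hxxdef, hyydef]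
          by_cases hc : size.getD (findRoot n parent w.1) 1 < size.getD (findRoot n parent w.2.1) 1
          · rw [if_pos hc, if_pos hc]; exact Or.inl ⟨rfl, rfl⟩
          · rw [if_neg hc, if_neg hc]; exact Or.inr ⟨rfl, rfl⟩
        have hxy : xx ≠ yy := by
          rcases hset with ⟨h1, h2⟩ | ⟨h1, h2⟩ <;> rw [h1, h2]
          · exact hrne
          · exact hrne.symm
        have hxroot : parent.getD xx xx = xx := by
          rcases hset with ⟨h1, _⟩ | ⟨h1, _⟩ <;> rw [h1]
          · exact hr1root
          · exact hr2root
        have hyroot : parent.getD yy yy = yy := by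
          rcases hset with ⟨_, h2⟩ | ⟨_, h2⟩ <;> rw [h2]
          · exact hr2root
          · exact hr1root
        -- mapped roots after the insert
        have hins : ∀ z : Int, 1 ≤ z → z ≤ (n : Int) →
            findRoot n (parent.insert xx yy) z
              = (if findRoot n parent z = xx then yy else findRoot n parent z)
            ∧ rootedBy (parent.insert xx yy) z (La.length + 1) := by
          intro z hz1 hzn
          obtain ⟨hr, hv⟩ := union_update hxroot hyroot hxy La.length z (inv.hroot z hz1 hzn)
          refine ⟨?_, hr⟩
          rw [rooted_stable hr hkn, hv, rooted_stable (inv.hroot z hz1 hzn) hknn]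
        -- which vertices lie in the merged lists
        have hmem1 : ∀ z : Int, 1 ≤ z → z ≤ (n : Int) →
            (z ∈ l1v ↔ findRoot n parent z = findRoot n parent w.1) := by
          intro z hz1 hzn
          constructor
          · intro hzl
            exact (inv.hcc z w.1 hz1 hzn hu1 hun).mp
              (by rw [LTC_first inv.hpw hl1mem hzl, hρu])
          · intro hk
            have := (inv.hcc z w.1 hz1 hzn hu1 hun).mpr hk
            rw [hρu] at this
            exact (LTC_some this).2
        have hmem2 : ∀ z : Int, 1 ≤ z → z ≤ (n : Int) →
            (z ∈ l2v ↔ findRoot n parent z = findRoot n parent w.2.1) := by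
          intro z hz1 hzn
          constructor
          · intro hzl
            exact (inv.hcc z w.2.1 hz1 hzn hv1 hvn).mp
              (by rw [LTC_first inv.hpw hl2mem hzl, hρv])
          · intro hk
            have := (inv.hcc z w.2.1 hz1 hzn hv1 hvn).mpr hk
            rw [hρv] at this
            exact (LTC_some this).2
        have hmapin : ∀ z : Int, 1 ≤ z → z ≤ (n : Int) → (z ∈ l1v ∨ z ∈ l2v) →
            (if findRoot n parent z = xx then yy else findRoot n parent z) = yy := by
          intro z hz1 hzn hz
          have hzr : findRoot n parent z = findRoot n parent w.1
              ∨ findRoot n parent z = findRoot n parent w.2.1 := by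
            rcases hz with hz | hz
            · exact Or.inl ((hmem1 z hz1 hzn).mp hz)
            · exact Or.inr ((hmem2 z hz1 hzn).mp hz)
          rcases hset with ⟨h1, h2⟩ | ⟨h1, h2⟩ <;> rcases hzr with hz' | hz' <;>
            rw [hz', h1, h2] <;> simp [hrne, hrne.symm]
        have hmapout : ∀ z : Int, 1 ≤ z → z ≤ (n : Int) → ¬(z ∈ l1v ∨ z ∈ l2v) →
            (if findRoot n parent z = xx then yy else findRoot n parent z)
              = findRoot n parent z ∧ findRoot n parent z ≠ yy := by
          intro z hz1 hzn hz
          push Not at hz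
          have hz1' : findRoot n parent z ≠ findRoot n parent w.1 :=
            fun h => hz.1 ((hmem1 z hz1 hzn).mpr h)
          have hz2' : findRoot n parent z ≠ findRoot n parent w.2.1 :=
            fun h => hz.2 ((hmem2 z hz1 hzn).mpr h)
          rcases hset with ⟨h1, h2⟩ | ⟨h1, h2⟩ <;> rw [h1, h2] <;>
            exact ⟨if_neg (by assumption), by assumption⟩
        -- the new coupled state satisfies the invariant
        have inv' : InvS n
            ((PySem.List.remove? (Ls.map (fun l => if l = l1v then l1v ++ l2v else l)) l2v).getD
              (Ls.map (fun l => if l = l1v then l1v ++ l2v else l)))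
            (La ++ [w])
            (if w.2.1 ∈ (if w.1 ∈ Lss then Lss else Lss ++ [w.1]) then
              (if w.1 ∈ Lss then Lss else Lss ++ [w.1])
             else (if w.1 ∈ Lss then Lss else Lss ++ [w.1]) ++ [w.2.1])
            (parent.insert xx yy)
            ((deg.insert w.1 (deg.getD w.1 0 + 1)).insert w.2.1
              ((deg.insert w.1 (deg.getD w.1 0 + 1)).getD w.2.1 0 + 1))
            (chosen ++ [(w.1, w.2.1)]) := by
          refine ⟨?_, ?_, ?_, hpw', ?_, ?_, ?_, ?_⟩
          · -- order list = second-pass fold over the accepted edges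
            rw [buildOrder_append, ← inv.hLss]
          · have h1 := hperm'.length_eq
            simp only [List.length_cons] at h1
            have htot := inv.hlen
            simp only [List.length_append, List.length_cons, List.length_nil]
            omega
          · intro l hl
            rcases (hmem' l).mp hl with rfl | hlM
            · intro hc
              rw [List.append_eq_nil_iff] at hc
              exact (inv.hne l1v hl1mem) hc.1
            · exact inv.hne l ((hmemM l).mpr (Or.inr (Or.inr hlM)))
          · intro s hs1 hsn
            obtain ⟨l, hlmem, hsl⟩ := inv.hcov s hs1 hsn
            rcases (hmemM l).mp hlmem with h | h | hlM
            · exact ⟨l1v ++ l2v, (hmem' _).mpr (Or.inl rfl), List.mem_append_left _ (h ▸ hsl)⟩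
            · exact ⟨l1v ++ l2v, (hmem' _).mpr (Or.inl rfl), List.mem_append_right _ (h ▸ hsl)⟩
            · exact ⟨l, (hmem' _).mpr (Or.inr hlM), hsl⟩
          · -- degree dictionary
            intro s hs1 hsn
            rw [listCount_append, inv.hcnt s hs1 hsn,
              PySem.Dict.getD_insert, PySem.Dict.getD_insert, PySem.Dict.getD_insert]
            have hvu : ¬ (w.2.1 = w.1) := fun h => hneuv h.symm
            rcases eq_or_ne s w.2.1 with rfl | hsv
            · simp [hvu]
            · rcases eq_or_ne s w.1 with rfl | hsu
              · simp [hsv]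
              · simp [hsv, hsu]
          · intro s hs1 hsn
            have h := (hins s hs1 hsn).2
            simpa using h
          · -- components
            intro s t hs1 hsn ht1 htn
            rw [LTC_update inv.hpw hperm' hperm s, LTC_update inv.hpw hperm' hperm t,
              (hins s hs1 hsn).1, (hins t ht1 htn).1]
            by_cases hsin : s ∈ l1v ∨ s ∈ l2v <;> by_cases htin : t ∈ l1v ∨ t ∈ l2v
            · rw [if_pos hsin, if_pos htin, hmapin s hs1 hsn hsin, hmapin t ht1 htn htin]
              simp
            · rw [if_pos hsin, if_neg htin, hmapin s hs1 hsn hsin]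
              obtain ⟨he, hne'⟩ := hmapout t ht1 htn htin
              rw [he]
              apply iff_of_false
              · intro h
                obtain ⟨_, hmem2'⟩ := LTC_some h.symm
                rcases List.mem_append.mp hmem2' with h' | h'
                · exact htin (Or.inl h')
                · exact htin (Or.inr h')
              · exact fun h => hne' h.symm
            · rw [if_neg hsin, if_pos htin, hmapin t ht1 htn htin]
              obtain ⟨he, hne'⟩ := hmapout s hs1 hsn hsin
              rw [he]
              apply iff_of_false
              · intro h
                obtain ⟨_, hmem2'⟩ := LTC_some h
                rcases List.mem_append.mp hmem2' with h' | h'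
                · exact hsin (Or.inl h')
                · exact hsin (Or.inr h')
              · exact hne'
            · rw [if_neg hsin, if_neg htin,
                (hmapout s hs1 hsn hsin).1, (hmapout t ht1 htn htin).1]
              exact inv.hcc s t hs1 hsn ht1 htn
        simp only [loopA, loopB, bSwap]
        rw [if_pos hdeg, if_pos hll, hρu, hρv]
        simp only [Option.getD_some]
        rw [if_pos hBdeg, if_pos hrne, ← hxxdef, ← hyydef]
        have hlen' : ((La ++ [w]).length : Int) = (La.length : Int) + 1 := by
          simp
        by_cases hstop : (La.length : Int) + 1 = (n : Int) - 1
        · rw [if_pos (by rw [hlen']; exact hstop)]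
          -- A breaks; B's remaining iterations accept nothing (single component)
          have hLs'1 : ((PySem.List.remove? (Ls.map (fun l => if l = l1v then l1v ++ l2v else l)) l2v).getD
              (Ls.map (fun l => if l = l1v then l1v ++ l2v else l))).length = 1 := by
            have h1 := hperm'.length_eq
            simp only [List.length_cons] at h1
            have h2 := inv'.hlen
            simp only [List.length_append, List.length_cons, List.length_nil] at h2
            omega
          have hone : ∀ z z' : Int, 1 ≤ z → z ≤ (n : Int) → 1 ≤ z' → z' ≤ (n : Int) →
              findRoot n (parent.insert xx yy) z = findRoot n (parent.insert xx yy) z' := by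
            intro z z' hz1 hzn hz1' hzn'
            obtain ⟨l0, hl0⟩ := List.length_eq_one_iff.mp hLs'1
            refine (inv'.hcc z z' hz1 hzn hz1' hzn').mp ?_
            obtain ⟨la, hla, hza⟩ := inv'.hcov z hz1 hzn
            obtain ⟨lb, hlb, hzb⟩ := inv'.hcov z' hz1' hzn'
            rw [hl0] at hla hlb
            simp only [List.mem_cons, List.not_mem_nil, or_false] at hla hlb
            subst hla; subst hlb
            rw [LTC_first inv'.hpw (by rw [hl0]; exact List.mem_cons_self) hza,
              LTC_first inv'.hpw (by rw [hl0]; exact List.mem_cons_self) hzb]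
          rw [loopB_noop n (rest.map bSwap) _ _ _ _ ?_]
          · exact (inv'.hLss).symm ▸ inv'.hLss
          · intro e he
            rw [List.mem_map] at he
            obtain ⟨e0, he0, rfl⟩ := he
            obtain ⟨h1, h2, h3⟩ := hend' e0 he0
            exact hone e0.1 e0.2.1 h1 (by omega) (by omega) h3
        · rw [if_neg (by rw [hlen']; exact hstop)]
          refine ih hend' _ _ _ _ _ _ _ inv' (fun _ => ?_)
          simpa using hstop
    · -- degree constraint fails: both sides skip the edge
      have hBc : ¬ (deg.getD w.1 0 < 2 ∧ deg.getD w.2.1 0 < 2) := by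
        rw [← hu_cnt, ← hv_cnt]; exact hdeg
      simp only [loopA, loopB, bSwap]
      rw [if_neg hdeg, if_neg hbreakA, if_neg hBc]
      exact ih hend' _ _ _ _ _ _ _ inv (fun _ => htk)

lemma pairwise_init (n : Nat) :
    ((List.range n).map (fun (k : Nat) => [(k : Int) + 1])).Pairwise disjL := by
  rw [List.pairwise_map]
  refine List.Pairwise.imp ?_ (List.pairwise_lt_range)
  intro a b hab x hx1 hx2
  simp at hx1 hx2
  omega

lemma mem_init {n : Nat} {s : Int} (h1 : 1 ≤ s) (h2 : s ≤ (n : Int)) :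
    [s] ∈ (List.range n).map (fun (k : Nat) => [(k : Int) + 1]) := by
  refine List.mem_map.mpr ⟨(s - 1).toNat, List.mem_range.mpr (by omega), ?_⟩
  have h3 : (((s - 1).toNat : Nat) : Int) + 1 = s := by omega
  rw [h3]

lemma inv_init (n : Nat) :
    InvS n ((List.range n).map (fun (k : Nat) => [(k : Int) + 1])) [] []
      PySem.Dict.empty PySem.Dict.empty [] := by
  refine ⟨rfl, by simp, ?_, pairwise_init n, ?_, ?_, ?_, ?_⟩
  · intro l hl
    rw [List.mem_map] at hl
    obtain ⟨k, _, rfl⟩ := hl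
    simp
  · intro s hs1 hsn
    exact ⟨[s], mem_init hs1 hsn, by simp⟩
  · intro s _ _
    simp [listCount, PySem.Dict.getD_empty]
  · intro s _ _
    unfold rootedBy
    simp [findRoot, PySem.Dict.getD_empty]
  · intro s t hs1 hsn ht1 htn
    rw [LTC_first (pairwise_init n) (mem_init hs1 hsn) (by simp),
      LTC_first (pairwise_init n) (mem_init ht1 htn) (by simp),
      findRoot_fix (by simp [PySem.Dict.getD_empty]) n,
      findRoot_fix (by simp [PySem.Dict.getD_empty]) n]
    simp

-- ===== VERDICT (by name: the statement is the Claim_ definition above) =====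
theorem Apminimum_spec : Claim_equal_Apminimum := by
  intro G _ _
  unfold Spec_Apminimum
  simp only [Apminimum, Apminimum_alt]
  rw [gToTriple_eq]
  have hB : ((List.range G.length).flatMap (fun (i : Nat) => (List.range' (i+1) (G.length - (i+1))).map (fun (j : Nat) =>
        (PySem.List.pyGetD (PySem.List.pyGetD G (i : Int) []) (j : Int) 0, (i : Int) + 1, (j : Int) + 1))))
      = (canonEdges G).map bSwap := by
    unfold canonEdges
    rw [List.map_flatMap]
    congr 1
    funext i
    rw [List.range'_eq_map_range, List.map_map, List.map_map]
    apply List.map_congr_left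
    intro k hk
    simp only [Function.comp, bSwap]
    refine Prod.ext ?_ (Prod.ext ?_ ?_) <;> simp [wAt] <;> ring_nf
  rw [hB, sorted_map_swap]
  rw [PySem.List.foldl_append_singleton_eq_map (fun i : Int => [i + 1]),
    PySem.List.pyRange_zero_nat, List.nil_append, List.map_map]
  have hL : ((List.range G.length).map ((fun i : Int => [i + 1]) ∘ fun k : Nat => (k : Int)))
      = (List.range G.length).map (fun (k : Nat) => [(k : Int) + 1]) := rfl
  rw [hL]
  have hend : ∀ e ∈ PySem.List.sorted (canonEdges G) takeValue,
      1 ≤ e.1 ∧ e.1 < e.2.1 ∧ e.2.1 ≤ (G.length : Int) :=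
    fun e he => canon_mem ((PySem.List.mem_sorted _ _ _ _).mp he)
  have hkey : (fun a : Int × Int × Int => (bSwap a).1) = takeValue := rfl
  rw [hkey]
  have hne0 : PySem.List.sorted (canonEdges G) takeValue ≠ [] → ((List.length ([] : List (Int × Int × Int)) : Int)) ≠ (G.length : Int) - 1 := by
    intro hl
    rw [Ne, PySem.List.sorted_eq_nil_iff] at hl
    obtain ⟨e, he⟩ := List.exists_mem_of_ne_nil _ hl
    have := canon_mem he
    simp only [List.length_nil, Int.natCast_zero]
    omega
  exact loop_eq _ hend _ _ _ _ _ _ _ (inv_init G.length) hne0
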